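-- pv_equiv track=rewrite | github.com/RawIron/hackerrank | interview-preparation/max_array_sum.py | gen_parts
-- ===== SOURCE A (Python) =====
-- def gen_parts(numbers):
--     '''
--     from a list of numbers extract the sequences of positive numbers
--
--     gen_parts([1,2,-3,-4,5,-6]) == [[1,2], [5]]
--     '''
--     indices = [i for i, x in enumerate(numbers) if x < 0]
--     indices.append(len(numbers))
--
--     begin = 0
--     for end in indices:
--         part = numbers[begin:end]
--         if part:
--             yield part
--         begin = end+1
-- ===== SOURCE B (Python) =====
-- def gen_parts(numbers):
--     '''
--     from a list of numbers extract the sequences of positive numbers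
--     (single streaming pass with a run buffer; no index table, no slicing)
--     '''
--     buf = []
--     for x in numbers:
--         if x < 0:
--             if buf:
--                 yield buf
--             buf = []
--         else:
--             buf.append(x)
--     if buf:
--         yield buf
-- ===== Notes on version B (the rewrite author's own statement) =====
-- stated objective: simpler
-- what changed: Replaced the two-phase algorithm (collect all negative indices into a table, then cut slices between consecutive indices) with a single streaming pass that grows a run buffer and emits it whenever a negative number or the end of the list is reached.
import Mathlib
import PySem

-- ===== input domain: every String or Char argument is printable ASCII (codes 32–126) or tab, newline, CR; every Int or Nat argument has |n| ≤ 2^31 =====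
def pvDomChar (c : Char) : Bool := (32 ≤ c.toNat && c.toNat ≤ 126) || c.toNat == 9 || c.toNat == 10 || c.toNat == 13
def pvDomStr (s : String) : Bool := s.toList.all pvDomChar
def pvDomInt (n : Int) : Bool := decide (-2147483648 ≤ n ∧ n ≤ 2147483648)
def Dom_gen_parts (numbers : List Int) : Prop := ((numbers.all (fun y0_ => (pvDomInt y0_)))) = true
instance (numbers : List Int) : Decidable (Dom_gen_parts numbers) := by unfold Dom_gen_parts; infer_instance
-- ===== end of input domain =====

-- B replaces A's two-phase algorithm (negative-index table, then slicing) by one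
-- streaming pass with a run buffer (objective: simpler). Both Pythons are generators;
-- the equivalence proved is about the list of yielded values.

-- ===== PORT A =====
-- indices = [i for i, x in enumerate(numbers) if x < 0]; indices.append(len(numbers))
-- begin = 0; for end in indices: part = numbers[begin:end]; if part: yield part; begin = end+1
def gen_parts (numbers : List Int) : List (List Int) :=
  let indices : List Int :=
    ((PySem.List.enumerate numbers 0).filterMap
      (fun p => if p.2 < 0 then some p.1 else none)) ++ [(numbers.length : Int)]
  (indices.foldl
    (fun (st : List (List Int) × Int) e =>
      let part := PySem.List.slice numbers (some st.2) (some e)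
      ((if part = [] then st.1 else st.1 ++ [part]), e + 1))
    ([], 0)).1

-- ===== PORT B =====
-- streaming pass: buf grows on x ≥ 0; a negative x emits a non-empty buf and resets it;
-- a final non-empty buf is emitted after the loop.
def altGo (buf : List Int) : List Int → List (List Int)
  | [] => if buf = [] then [] else [buf]
  | x :: xs =>
      if x < 0 then
        if buf = [] then altGo [] xs else buf :: altGo [] xs
      else altGo (buf ++ [x]) xs

def gen_parts_alt (numbers : List Int) : List (List Int) :=
  altGo [] numbers

-- ===== PRECONDITION & SPEC =====
def Spec_gen_parts (numbers : List Int) (out : List (List Int)) : Prop := out = gen_parts_alt numbers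
instance (numbers : List Int) (out : List (List Int)) : Decidable (Spec_gen_parts numbers out) := by unfold Spec_gen_parts; infer_instance

-- ===== CLAIM (what is proved, stated in full; the proofs are below) =====
def Claim_equal_gen_parts : Prop := ∀ (numbers : List Int), Dom_gen_parts numbers → Spec_gen_parts numbers (gen_parts numbers)

-- ===== LEMMAS AND PROOFS =====

-- positions (as naturals) of the negative entries, starting at offset s
def negIdxN : List Int → Nat → List Nat
  | [], _ => []
  | x :: xs, s => if x < 0 then s :: negIdxN xs (s+1) else negIdxN xs (s+1)

-- the "end" list A iterates over
def ends (xs : List Int) : List Nat := negIdxN xs 0 ++ [xs.length]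

-- A's loop, in the natural-number world
def aGo (numbers : List Int) : Nat → List Nat → List (List Int)
  | _, [] => []
  | b, e :: es =>
      let part := (numbers.drop b).take (e - b)
      if part = [] then aGo numbers (e+1) es else part :: aGo numbers (e+1) es

lemma enumerate_filterMap_negIdx (xs : List Int) (s : Nat) :
    (PySem.List.enumerate xs (s : Int)).filterMap
      (fun p => if p.2 < 0 then some p.1 else none)
    = (negIdxN xs s).map (fun (n : Nat) => (n : Int)) := by
  induction xs generalizing s with
  | nil => simp [PySem.List.enumerate_nil, negIdxN]
  | cons x xs ih =>
      rw [PySem.List.enumerate_cons]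
      have h1 : (s : Int) + 1 = ((s + 1 : Nat) : Int) := by push_cast; ring
      simp only [List.filterMap_cons, h1, ih, negIdxN]
      by_cases h : x < 0 <;> simp [h]

lemma foldl_aGo (numbers : List Int) (es : List Nat) :
    ∀ (b : Nat) (acc : List (List Int)),
    ((es.map (fun (n : Nat) => (n : Int))).foldl
      (fun (st : List (List Int) × Int) e =>
        let part := PySem.List.slice numbers (some st.2) (some e)
        ((if part = [] then st.1 else st.1 ++ [part]), e + 1))
      (acc, ((b : Nat) : Int))).1
    = acc ++ aGo numbers b es := by
  induction es with
  | nil => intro b acc; simp [aGo]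
  | cons e es ih =>
      intro b acc
      rw [List.map_cons, List.foldl_cons]
      simp only [PySem.List.slice_natCast]
      have h1 : ((e : Int) + 1) = ((e + 1 : Nat) : Int) := by push_cast; ring
      rw [h1, ih]
      by_cases h : (numbers.drop b).take (e - b) = [] <;>
        simp [aGo, h, List.append_assoc]

lemma gen_parts_eq_aGo (numbers : List Int) :
    gen_parts numbers = aGo numbers 0 (ends numbers) := by
  simp only [gen_parts]
  have h0 : ((PySem.List.enumerate numbers 0).filterMap
      (fun p => if p.2 < 0 then some p.1 else none)) ++ [(numbers.length : Int)]
      = (ends numbers).map (fun (n : Nat) => (n : Int)) := by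
    have := enumerate_filterMap_negIdx numbers 0
    simp only [Nat.cast_zero] at this
    simp [this, ends]
  rw [h0]
  simpa using foldl_aGo numbers (ends numbers) 0 []

-- shifting the offset of negIdxN shifts every index
lemma negIdxN_succ (xs : List Int) : ∀ s, negIdxN xs (s+1) = (negIdxN xs s).map (· + 1) := by
  induction xs with
  | nil => intro s; simp [negIdxN]
  | cons x xs ih =>
      intro s
      by_cases h : x < 0 <;> simp [negIdxN, h, ih]

lemma ends_cons_neg (x : Int) (xs : List Int) (h : x < 0) :
    ends (x :: xs) = 0 :: (ends xs).map (· + 1) := by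
  simp [ends, negIdxN, h, negIdxN_succ]

lemma ends_cons_nonneg (x : Int) (xs : List Int) (h : ¬ x < 0) :
    ends (x :: xs) = (ends xs).map (· + 1) := by
  simp [ends, negIdxN, h, negIdxN_succ]

lemma ends_ne_nil (xs : List Int) : ends xs ≠ [] := by
  simp [ends]

-- shift lemma: consuming one head element shifts A's loop by one
lemma aGo_shift (x : Int) (xs : List Int) (es : List Nat) :
    ∀ b, aGo (x :: xs) (b+1) (es.map (· + 1)) = aGo xs b es := by
  induction es with
  | nil => intro b; simp [aGo]
  | cons e es ih =>
      intro b
      simp only [List.map_cons, aGo, List.drop_succ_cons, Nat.succ_sub_succ]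
      rw [ih]

lemma aGo_ends_neg (x : Int) (xs : List Int) (h : x < 0) :
    aGo (x :: xs) 0 (ends (x :: xs)) = aGo xs 0 (ends xs) := by
  rw [ends_cons_neg x xs h]
  simp only [aGo, Nat.sub_self, List.take_zero]
  exact aGo_shift x xs (ends xs) 0

lemma aGo_ends_pos (x : Int) (xs : List Int) (h : ¬ x < 0) (e : Nat) (es : List Nat)
    (he : ends xs = e :: es) :
    aGo (x :: xs) 0 (ends (x :: xs)) = (x :: xs.take e) :: aGo xs (e+1) es := by
  rw [ends_cons_nonneg x xs h, he]
  simp only [List.map_cons, aGo, Nat.sub_zero, List.drop_zero, List.take_succ_cons]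
  rw [if_neg (by simp)]
  congr 1
  exact aGo_shift x xs es (e+1)

-- B side: prepending to a non-empty buffer prepends to the first emitted run
lemma altGo_prepend (xs : List Int) :
    ∀ (b : List Int), b ≠ [] →
      ∀ (c : List Int), altGo (c ++ b) xs = (c ++ (altGo b xs).headI) :: (altGo b xs).tail := by
  induction xs with
  | nil => intro b hb c; simp [altGo, hb]
  | cons x xs ih =>
      intro b hb c
      by_cases h : x < 0
      · simp [altGo, h, hb]
      · simp only [altGo, if_neg h]
        rw [List.append_assoc]
        exact ih (b ++ [x]) (by simp) c

-- main equivalence, by induction on the list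
lemma aGo_eq_altGo : ∀ (xs : List Int), aGo xs 0 (ends xs) = altGo [] xs := by
  intro xs
  induction xs with
  | nil => simp [ends, negIdxN, aGo, altGo]
  | cons x xs ih =>
      by_cases h : x < 0
      · rw [aGo_ends_neg x xs h, ih]
        simp [altGo, h]
      · -- x ≥ 0
        cases xs with
        | nil => simp [ends, negIdxN, aGo, altGo, h]
        | cons y ys =>
            by_cases hy : y < 0
            · -- run of length 1 at the front
              have he : ends (y :: ys) = 0 :: (ends ys).map (· + 1) := ends_cons_neg y ys hy
              rw [aGo_ends_pos x (y :: ys) h 0 ((ends ys).map (· + 1)) he]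
              have hsh : aGo (y :: ys) 1 ((ends ys).map (· + 1)) = aGo ys 0 (ends ys) :=
                aGo_shift y ys (ends ys) 0
              have hihy : aGo ys 0 (ends ys) = altGo [] ys := by
                have h2 := aGo_ends_neg y ys hy
                rw [h2] at ih
                simpa [altGo, hy] using ih
              simp only [Nat.zero_add, hsh, hihy, List.take_zero]
              simp [altGo, h, hy]
            · -- x and y belong to the same run
              obtain ⟨e', es', he'⟩ : ∃ e' es', ends ys = e' :: es' := by
                cases hE : ends ys with
                | nil => exact absurd hE (ends_ne_nil ys)
                | cons a l => exact ⟨a, l, rfl⟩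
              have he : ends (y :: ys) = (e' + 1) :: es'.map (· + 1) := by
                rw [ends_cons_nonneg y ys hy, he']; simp
              rw [aGo_ends_pos x (y :: ys) h (e' + 1) (es'.map (· + 1)) he]
              have hxs : aGo (y :: ys) 0 (ends (y :: ys)) = (y :: ys.take e') :: aGo ys (e'+1) es' :=
                aGo_ends_pos y ys hy e' es' he'
              have hhead : altGo [y] ys = (y :: ys.take e') :: aGo ys (e'+1) es' := by
                have hB : altGo [] (y :: ys) = altGo [y] ys := by simp [altGo, hy]
                rw [← hB, ← ih, hxs]
              have hP := altGo_prepend ys [y] (by simp) [x]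
              rw [hhead] at hP
              have hRHS : altGo [] (x :: y :: ys) = altGo ([x] ++ [y]) ys := by
                simp [altGo, h, hy]
              rw [hRHS, hP]
              simp [aGo_shift y ys es' (e'+1), List.take_succ_cons]

-- ===== VERDICT (by name: the statement is the Claim_ definition above) =====
theorem gen_parts_spec : Claim_equal_gen_parts := by
  intro numbers _
  unfold Spec_gen_parts gen_parts_alt
  rw [gen_parts_eq_aGo, aGo_eq_altGo]
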